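-- pv_equiv track=rewrite | github.com/shabari8695/cmpe255-spring19-lab1 | friends.py | num_friends
-- ===== SOURCE A (Python) =====
-- users =[
--     { "id":0, "name": "Hero" },
--     { "id":1, "name": "Dunn" },
--     { "id":2, "name": "Sue" },
--     { "id":3, "name": "Chi" },
--     { "id":4, "name": "Thor" },
--     { "id":5, "name": "Clive" },
--     { "id":6, "name": "Hicks" },
--     { "id":7, "name": "Devin" },
--     { "id":8, "name": "Kate" },
--     { "id":9, "name": "Klein" }
-- ]
--
-- friendship = [
--     (0, 1),
--     (0, 2),
--     (1, 2),
--     (1, 3),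
--     (2, 3),
--     (3, 4),
--     (4, 5),
--     (5, 6),
--     (6, 7),
--     (6, 8),
--     (7, 8),
--     (8, 9)
-- ]
--
-- def num_friends(user):
--     '''
--     Find number of friends for a given user
--     '''
--     i_d = -1
--     for u in users:
--         if u['name'] == user:
--             i_d = u['id']
--             break
--
--     count = 0
--     for tup in friendship:
--         if tup[0] == i_d or tup[1] == i_d:
--             count += 1
--
--     return count
-- ===== SOURCE B (Python) =====
-- users =[
--     { "id":0, "name": "Hero" },
--     { "id":1, "name": "Dunn" },
--     { "id":2, "name": "Sue" },
--     { "id":3, "name": "Chi" },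
--     { "id":4, "name": "Thor" },
--     { "id":5, "name": "Clive" },
--     { "id":6, "name": "Hicks" },
--     { "id":7, "name": "Devin" },
--     { "id":8, "name": "Kate" },
--     { "id":9, "name": "Klein" }
-- ]
--
-- friendship = [
--     (0, 1),
--     (0, 2),
--     (1, 2),
--     (1, 3),
--     (2, 3),
--     (3, 4),
--     (4, 5),
--     (5, 6),
--     (6, 7),
--     (6, 8),
--     (7, 8),
--     (8, 9)
-- ]
--
-- # Precomputed once at module load: name -> id, and id -> friendship count.
-- name_to_id = {u['name']: u['id'] for u in users}
-- counts = {}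
-- for a, b in friendship:
--     counts[a] = counts.get(a, 0) + 1
--     counts[b] = counts.get(b, 0) + 1
--
-- def num_friends(user):
--     '''
--     Find number of friends for a given user
--     '''
--     return counts.get(name_to_id.get(user, -1), 0)
-- ===== Notes on version B (the rewrite author's own statement) =====
-- stated objective: faster
-- what changed: Replaces the per-call linear scan of users plus full pass over the friendship list with two module-level precomputed dictionaries (name->id and id->friendship count), so each call is two O(1) lookups.
import Mathlib
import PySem

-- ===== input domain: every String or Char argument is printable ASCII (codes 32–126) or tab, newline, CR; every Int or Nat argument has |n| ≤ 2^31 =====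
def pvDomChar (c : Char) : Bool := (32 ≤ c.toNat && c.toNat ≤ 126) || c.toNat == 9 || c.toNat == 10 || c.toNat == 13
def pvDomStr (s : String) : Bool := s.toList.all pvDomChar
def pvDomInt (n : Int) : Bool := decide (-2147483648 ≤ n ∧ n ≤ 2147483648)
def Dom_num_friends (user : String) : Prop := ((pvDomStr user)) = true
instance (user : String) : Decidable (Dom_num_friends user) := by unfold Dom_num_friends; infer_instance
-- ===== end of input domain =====

-- B replaces A's per-call scans with two precomputed lookup tables (name->id, id->count); return value only.

-- ===== PORT A =====
-- users, each {"id": i, "name": n} modelled as the pair (i, n)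
def pvUsersA : List (Int × String) :=
  [(0, "Hero"), (1, "Dunn"), (2, "Sue"), (3, "Chi"), (4, "Thor"),
   (5, "Clive"), (6, "Hicks"), (7, "Devin"), (8, "Kate"), (9, "Klein")]

def pvFriendshipA : List (Int × Int) :=
  [(0, 1), (0, 2), (1, 2), (1, 3), (2, 3), (3, 4),
   (4, 5), (5, 6), (6, 7), (6, 8), (7, 8), (8, 9)]

-- the first loop: i_d = -1; for u in users: if u['name'] == user: i_d = u['id']; break
def pvFindId : List (Int × String) → String → Int
  | [], _ => -1
  | u :: rest, user => if u.2 == user then u.1 else pvFindId rest user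

def num_friends (user : String) : Int :=
  let i_d := pvFindId pvUsersA user
  pvFriendshipA.foldl (fun count tup => if tup.1 == i_d || tup.2 == i_d then count + 1 else count) 0

-- ===== PORT B =====
def pvFriendshipB : List (Int × Int) :=
  [(0, 1), (0, 2), (1, 2), (1, 3), (2, 3), (3, 4),
   (4, 5), (5, 6), (6, 7), (6, 8), (7, 8), (8, 9)]

-- name_to_id = {u['name']: u['id'] for u in users}
def pvNameToId : PySem.Dict String Int :=
  PySem.Dict.ofList
    [("Hero", 0), ("Dunn", 1), ("Sue", 2), ("Chi", 3), ("Thor", 4),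
     ("Clive", 5), ("Hicks", 6), ("Devin", 7), ("Kate", 8), ("Klein", 9)]

-- counts: for a, b in friendship: counts[a] += 1; counts[b] += 1  (via .get(_, 0))
def pvCounts : PySem.Dict Int Int :=
  pvFriendshipB.foldl
    (fun d p =>
      let d1 := d.insert p.1 (d.getD p.1 0 + 1)
      d1.insert p.2 (d1.getD p.2 0 + 1))
    PySem.Dict.empty

def num_friends_alt (user : String) : Int :=
  pvCounts.getD (pvNameToId.getD user (-1)) 0

-- ===== PRECONDITION & SPEC =====
def Spec_num_friends (user : String) (out : Int) : Prop := out = num_friends_alt user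
instance (user : String) (out : Int) : Decidable (Spec_num_friends user out) := by unfold Spec_num_friends; infer_instance

-- ===== CLAIM (what is proved, stated in full; the proofs are below) =====
def Claim_equal_num_friends : Prop := ∀ (user : String), Dom_num_friends user → Spec_num_friends user (num_friends user)

-- ===== LEMMAS AND PROOFS =====

-- ===== VERDICT (by name: the statement is the Claim_ definition above) =====
theorem num_friends_spec : Claim_equal_num_friends := by
  intro user _
  unfold Spec_num_friends
  by_cases h0 : user = "Hero"; · subst h0; decide
  by_cases h1 : user = "Dunn"; · subst h1; decide
  by_cases h2 : user = "Sue"; · subst h2; decide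
  by_cases h3 : user = "Chi"; · subst h3; decide
  by_cases h4 : user = "Thor"; · subst h4; decide
  by_cases h5 : user = "Clive"; · subst h5; decide
  by_cases h6 : user = "Hicks"; · subst h6; decide
  by_cases h7 : user = "Devin"; · subst h7; decide
  by_cases h8 : user = "Kate"; · subst h8; decide
  by_cases h9 : user = "Klein"; · subst h9; decide
  have hA : pvFindId pvUsersA user = -1 := by
    simp [pvFindId, pvUsersA, beq_iff_eq, Ne.symm h0, Ne.symm h1, Ne.symm h2, Ne.symm h3,
      Ne.symm h4, Ne.symm h5, Ne.symm h6, Ne.symm h7, Ne.symm h8, Ne.symm h9]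
  have hB : pvNameToId.getD user (-1) = -1 := by
    have e : pvNameToId = PySem.Dict.mk
        [("Hero", (0 : Int)), ("Dunn", 1), ("Sue", 2), ("Chi", 3), ("Thor", 4),
         ("Clive", 5), ("Hicks", 6), ("Devin", 7), ("Kate", 8), ("Klein", 9)] := by decide
    simp [e, PySem.Dict.getD, PySem.Dict.get?, beq_iff_eq, Ne.symm h0, Ne.symm h1,
      Ne.symm h2, Ne.symm h3, Ne.symm h4, Ne.symm h5, Ne.symm h6, Ne.symm h7, Ne.symm h8,
      Ne.symm h9]
  show num_friends user = num_friends_alt user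
  rw [num_friends, num_friends_alt, hA, hB]
  decide
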